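-- pv_equiv track=rewrite | github.com/sarrkar/WM-abstract | helper.py | reorder_combined_int_by_feature
-- ===== SOURCE A (Python) =====
-- def reorder_combined_int_by_feature(combined_int_mapping, feature='category'):
--     # Initialize a dictionary to group combined_int by feature index
--     feature_groups = {}
--
--     # Iterate through the combined_int_mapping to group by the specified feature
--     for combined_int, (category_index, identity_index, position_index) in combined_int_mapping.items():
--         if feature == 'category':
--             feature_index = category_index
--         elif feature == 'identity':
--             feature_index = identity_index
--         elif feature == 'position':
--             feature_index = position_index
--         else:
--             raise ValueError("Invalid feature. Choose from 'category', 'identity', or 'position'.")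
--
--         # Add the combined_int to the corresponding feature group
--         if feature_index not in feature_groups:
--             feature_groups[feature_index] = []
--         feature_groups[feature_index].append(combined_int)
--
--     # Sort the feature groups by feature index and flatten into a single list
--     reordered_combined_int = []
--     for feature_index in sorted(feature_groups.keys()):
--         reordered_combined_int.extend(feature_groups[feature_index])
--
--     return reordered_combined_int
-- ===== SOURCE B (Python) =====
-- def reorder_combined_int_by_feature(combined_int_mapping, feature='category'):
--     def slot(triple):
--         if feature == 'category':
--             return triple[0]
--         if feature == 'identity':
--             return triple[1]
--         if feature == 'position':
--             return triple[2]
--         raise ValueError("Invalid feature. Choose from 'category', 'identity', or 'position'.")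
--
--     items = list(combined_int_mapping.items())
--     return [combined_int
--             for key in sorted({slot(triple) for _, triple in items})
--             for combined_int, triple in items
--             if slot(triple) == key]
-- ===== Notes on version B (the rewrite author's own statement) =====
-- stated objective: simpler
-- what changed: Replaces the incrementally built dict of per-index buckets plus a separate flatten loop by sorting the distinct feature indices and emitting, for each, the matching entries with a filter comprehension.
import Mathlib
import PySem

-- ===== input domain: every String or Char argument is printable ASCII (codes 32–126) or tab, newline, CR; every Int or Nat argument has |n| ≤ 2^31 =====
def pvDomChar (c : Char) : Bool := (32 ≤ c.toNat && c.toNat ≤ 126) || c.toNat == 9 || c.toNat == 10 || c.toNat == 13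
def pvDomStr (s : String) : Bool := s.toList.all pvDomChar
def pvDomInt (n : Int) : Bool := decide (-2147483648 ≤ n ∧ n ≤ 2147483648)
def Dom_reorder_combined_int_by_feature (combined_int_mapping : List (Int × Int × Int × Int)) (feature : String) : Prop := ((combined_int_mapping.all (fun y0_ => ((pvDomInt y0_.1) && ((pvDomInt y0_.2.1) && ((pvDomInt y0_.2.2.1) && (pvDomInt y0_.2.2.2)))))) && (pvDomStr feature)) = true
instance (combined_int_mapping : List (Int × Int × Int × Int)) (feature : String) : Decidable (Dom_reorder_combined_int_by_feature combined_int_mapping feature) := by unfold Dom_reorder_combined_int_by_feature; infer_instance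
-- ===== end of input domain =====

-- B replaces A's incrementally built dict of per-index buckets plus a separate flatten loop
-- by sorting the distinct feature indices and filtering the items once per index (objective: simpler).

-- Shared ARGUMENT DECODING (not algorithm): the Python parameter is a dict[int, tuple[int,int,int]];
-- the List (Int × Int × Int × Int) argument is turned into its dict items (duplicate keys overwrite,
-- first-insertion position kept — exact Python dict semantics via PySem.Dict).
def pvDictItems (combined_int_mapping : List (Int × Int × Int × Int)) :
    List (Int × (Int × Int × Int)) :=
  (combined_int_mapping.foldl (fun d p => d.insert p.1 p.2)
    (PySem.Dict.empty : PySem.Dict Int (Int × Int × Int))).items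

-- Shared if/elif/else chain selecting the feature component; none = the explicit raise ValueError.
def pvFeatureSlot (feature : String) (t : Int × Int × Int) : Option Int :=
  if feature = "category" then some t.1
  else if feature = "identity" then some t.2.1
  else if feature = "position" then some t.2.2
  else none

-- ===== PORT A =====
-- the grouping loop of A: builds feature_groups; none = ValueError raised inside the loop
def pvGroupLoop (feature : String) :
    List (Int × (Int × Int × Int)) → PySem.Dict Int (List Int) →
    Option (PySem.Dict Int (List Int))
  | [], g => some g
  | p :: rest, g =>
    match pvFeatureSlot feature p.2 with
    | none => none
    | some k => pvGroupLoop feature rest (g.insert k (g.getD k [] ++ [p.1]))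

def reorder_combined_int_by_feature (combined_int_mapping : List (Int × Int × Int × Int)) (feature : String) : List Int :=
  match pvGroupLoop feature (pvDictItems combined_int_mapping) PySem.Dict.empty with
  | none => []   -- A raises ValueError here; excluded by Pre_
  | some feature_groups =>
      (PySem.List.sorted feature_groups.keys (fun k => k) false).foldl
        (fun acc k => acc ++ feature_groups.getD k []) []

-- ===== PORT B =====
def reorder_combined_int_by_feature_alt (combined_int_mapping : List (Int × Int × Int × Int)) (feature : String) : List Int :=
  let items := pvDictItems combined_int_mapping
  match items.mapM (fun p => pvFeatureSlot feature p.2) with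
  | none => []   -- B raises ValueError here; excluded by Pre_
  | some slots =>
      (PySem.List.sorted (PySem.Set.ofList slots) (fun k => k) false).flatMap
        (fun k => (items.filter (fun p => pvFeatureSlot feature p.2 == some k)).map (fun p => p.1))

-- ===== PRECONDITION & SPEC =====
-- Pre_ excludes exactly the inputs where both Pythons raise ValueError: an invalid feature name
-- together with a nonempty mapping (on an empty mapping the loop body never runs, so no raise).
def Pre_reorder_combined_int_by_feature (combined_int_mapping : List (Int × Int × Int × Int)) (feature : String) : Prop :=
  feature = "category" ∨ feature = "identity" ∨ feature = "position" ∨ combined_int_mapping = []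
instance (combined_int_mapping : List (Int × Int × Int × Int)) (feature : String) : Decidable (Pre_reorder_combined_int_by_feature combined_int_mapping feature) := by unfold Pre_reorder_combined_int_by_feature; infer_instance

def pvWitness_reorder_combined_int_by_feature : (List (Int × Int × Int × Int)) × String :=
  ([(10, 1, 5, 2), (11, 0, 4, 2), (12, 1, 3, 1)], "category")

def Spec_reorder_combined_int_by_feature (combined_int_mapping : List (Int × Int × Int × Int)) (feature : String) (out : List Int) : Prop := out = reorder_combined_int_by_feature_alt combined_int_mapping feature
instance (combined_int_mapping : List (Int × Int × Int × Int)) (feature : String) (out : List Int) : Decidable (Spec_reorder_combined_int_by_feature combined_int_mapping feature out) := by unfold Spec_reorder_combined_int_by_feature; infer_instance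

-- ===== CLAIM (what is proved, stated in full; the proofs are below) =====
def Claim_equal_reorder_combined_int_by_feature : Prop := ∀ (combined_int_mapping : List (Int × Int × Int × Int)) (feature : String), Dom_reorder_combined_int_by_feature combined_int_mapping feature → Pre_reorder_combined_int_by_feature combined_int_mapping feature → Spec_reorder_combined_int_by_feature combined_int_mapping feature (reorder_combined_int_by_feature combined_int_mapping feature)

-- ===== LEMMAS AND PROOFS =====

-- the pure grouping fold (pvGroupLoop with a total slot function f)
def pvGroupFold (f : Int × Int × Int → Int) (items : List (Int × (Int × Int × Int)))
    (g : PySem.Dict Int (List Int)) : PySem.Dict Int (List Int) :=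
  items.foldl (fun d p => d.insert (f p.2) (d.getD (f p.2) [] ++ [p.1])) g

lemma groupLoop_eq_fold (feature : String) (f : Int × Int × Int → Int)
    (hf : ∀ t, pvFeatureSlot feature t = some (f t)) :
    ∀ (items : List (Int × (Int × Int × Int))) (g : PySem.Dict Int (List Int)),
      pvGroupLoop feature items g = some (pvGroupFold f items g)
  | [], g => rfl
  | p :: rest, g => by
    simp only [pvGroupLoop, hf, pvGroupFold, List.foldl_cons]
    exact groupLoop_eq_fold feature f hf rest _

lemma keys_insert_add {ν : Type} (d : PySem.Dict Int ν) (k : Int) (v : ν) :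
    (d.insert k v).keys = PySem.Set.add d.keys k := by
  rw [PySem.Set.add_eq_ite]
  by_cases h : d.contains k = true
  · rw [PySem.Dict.keys_insert_of_contains d v h, if_pos ((PySem.Dict.contains_iff_mem_keys d k).mp h)]
  · rw [PySem.Dict.keys_insert_of_not_contains d v (eq_false_of_ne_true h),
      if_neg (fun hm => h ((PySem.Dict.contains_iff_mem_keys d k).mpr hm))]

lemma keys_groupFold (f : Int × Int × Int → Int) :
    ∀ (items : List (Int × (Int × Int × Int))) (g : PySem.Dict Int (List Int)),
      (pvGroupFold f items g).keys = PySem.Set.update g.keys (items.map (fun p => f p.2))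
  | [], g => rfl
  | p :: rest, g => by
    simp only [pvGroupFold, List.foldl_cons, List.map_cons, PySem.Set.update_cons]
    rw [← keys_insert_add g (f p.2) (g.getD (f p.2) [] ++ [p.1])]
    exact keys_groupFold f rest _

lemma getD_groupFold (f : Int × Int × Int → Int) :
    ∀ (items : List (Int × (Int × Int × Int))) (g : PySem.Dict Int (List Int)) (k : Int),
      (pvGroupFold f items g).getD k [] =
        g.getD k [] ++ (items.filter (fun p => f p.2 == k)).map (fun p => p.1)
  | [], g, k => by simp [pvGroupFold]
  | p :: rest, g, k => by
    have ih := getD_groupFold f rest (g.insert (f p.2) (g.getD (f p.2) [] ++ [p.1])) k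
    simp only [pvGroupFold, List.foldl_cons, List.filter_cons] at ih ⊢
    rw [ih, PySem.Dict.getD_insert]
    by_cases h : f p.2 = k
    · simp [h]
    · simp [h, Ne.symm h]

lemma mapM_slots (feature : String) (f : Int × Int × Int → Int)
    (hf : ∀ t, pvFeatureSlot feature t = some (f t)) :
    ∀ (items : List (Int × (Int × Int × Int))),
      items.mapM (fun p => pvFeatureSlot feature p.2) = some (items.map (fun p => f p.2))
  | [] => rfl
  | p :: rest => by
    have ih := mapM_slots feature f hf rest
    simp only [hf] at ih
    simp [List.mapM_cons, hf, ih]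

-- core equivalence for a valid feature selector
lemma ports_agree (feature : String) (f : Int × Int × Int → Int)
    (hf : ∀ t, pvFeatureSlot feature t = some (f t))
    (combined_int_mapping : List (Int × Int × Int × Int)) :
    reorder_combined_int_by_feature combined_int_mapping feature =
      reorder_combined_int_by_feature_alt combined_int_mapping feature := by
  simp only [reorder_combined_int_by_feature, reorder_combined_int_by_feature_alt,
    groupLoop_eq_fold feature f hf, mapM_slots feature f hf]
  rw [keys_groupFold f, PySem.Dict.keys_empty, PySem.Set.update_nil_left,
    PySem.List.foldl_append_eq_flatMap, List.nil_append]
  congr 1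
  funext k
  rw [getD_groupFold f, PySem.Dict.getD_empty, List.nil_append]
  congr 1
  apply List.filter_congr
  intro p _
  simp [hf]

-- ===== VERDICT (by name: the statement is the Claim_ definition above) =====
theorem reorder_combined_int_by_feature_spec : Claim_equal_reorder_combined_int_by_feature := by
  intro combined_int_mapping feature _ hpre
  unfold Spec_reorder_combined_int_by_feature
  rcases hpre with h | h | h | h
  · subst h; exact ports_agree _ (fun t => t.1) (fun t => by simp [pvFeatureSlot]) _
  · subst h; exact ports_agree _ (fun t => t.2.1) (fun t => by simp [pvFeatureSlot]) _
  · subst h; exact ports_agree _ (fun t => t.2.2) (fun t => by simp [pvFeatureSlot]) _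
  · subst h; rfl
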